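-- pv_equiv track=rewrite | github.com/josepablovr/Tarea2ArguelloVasquez | prueba_hilos.py | distribuir_hilos
-- ===== SOURCE A (Python) =====
-- def distribuir_hilos(length):
--     num_elem = length // 4  # tamaño mínimo de cada grupo
--     sobrantes = length % 4  # residuo de división entre 4
--     inicio = 0
--     distribucion = []  # se definen las variables iniciales
--
--     for i in range(4):  # ciclo para generar el array de indices
--         if sobrantes > 0:  # condición que define el tamaño de cada grupo
--             final = inicio + num_elem + 1
--             sobrantes -= 1
--         else:
--             final = inicio + num_elem
--
--         distribucion.append((inicio, final))  # se agregan los nuevos indices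
--         inicio = final
--
--     return distribucion  # se retorna el array de tuplas con los índices
-- ===== SOURCE B (Python) =====
-- def distribuir_hilos(length):
--     num_elem = length // 4
--     sobrantes = length % 4
--     return [(i * num_elem + min(i, sobrantes),
--              (i + 1) * num_elem + min(i + 1, sobrantes))
--             for i in range(4)]
-- ===== Notes on version B (the rewrite author's own statement) =====
-- stated objective: simpler
-- what changed: Replaced the sequential running-start accumulator with a decrementing remainder counter by a direct closed-form comprehension: range i has bounds i*num_elem + min(i, sobrantes) and (i+1)*num_elem + min(i+1, sobrantes).
import Mathlib
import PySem

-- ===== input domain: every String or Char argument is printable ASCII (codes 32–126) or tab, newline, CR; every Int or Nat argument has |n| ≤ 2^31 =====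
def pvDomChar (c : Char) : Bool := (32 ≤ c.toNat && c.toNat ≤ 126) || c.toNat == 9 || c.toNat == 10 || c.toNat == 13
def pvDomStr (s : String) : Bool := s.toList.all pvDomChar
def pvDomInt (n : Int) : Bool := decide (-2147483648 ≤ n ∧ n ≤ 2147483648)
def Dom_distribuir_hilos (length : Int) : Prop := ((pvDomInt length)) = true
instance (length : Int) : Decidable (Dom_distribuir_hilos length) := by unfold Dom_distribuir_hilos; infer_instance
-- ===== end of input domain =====

-- B replaces A's running-start/decrementing-remainder loop by a closed-form
-- per-index formula using min(i, length % 4); objective: simpler.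

-- ===== PORT A =====
-- state: (sobrantes, inicio, distribucion); loop over range(4)
def distribuir_hilos (length : Int) : List (Int × Int) :=
  let num_elem := PySem.Int.floordiv length 4
  let sobrantes := PySem.Int.mod length 4
  let st :=
    (PySem.List.pyRange 0 4 1).foldl
      (fun (st : Int × Int × List (Int × Int)) (_i : Int) =>
        let (sobrantes, inicio, distribucion) := st
        if sobrantes > 0 then
          let final := inicio + num_elem + 1
          (sobrantes - 1, final, distribucion ++ [(inicio, final)])
        else
          let final := inicio + num_elem
          (sobrantes, final, distribucion ++ [(inicio, final)]))
      (sobrantes, 0, [])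
  st.2.2

-- ===== PORT B =====
def distribuir_hilos_alt (length : Int) : List (Int × Int) :=
  let num_elem := PySem.Int.floordiv length 4
  let sobrantes := PySem.Int.mod length 4
  (PySem.List.pyRange 0 4 1).map
    (fun i => (i * num_elem + min i sobrantes,
               (i + 1) * num_elem + min (i + 1) sobrantes))

-- ===== PRECONDITION & SPEC =====
def Spec_distribuir_hilos (length : Int) (out : List (Int × Int)) : Prop := out = distribuir_hilos_alt length
instance (length : Int) (out : List (Int × Int)) : Decidable (Spec_distribuir_hilos length out) := by unfold Spec_distribuir_hilos; infer_instance

-- ===== CLAIM (what is proved, stated in full; the proofs are below) =====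
def Claim_equal_distribuir_hilos : Prop := ∀ (length : Int), Dom_distribuir_hilos length → Spec_distribuir_hilos length (distribuir_hilos length)

-- ===== LEMMAS AND PROOFS =====

-- ===== VERDICT (by name: the statement is the Claim_ definition above) =====
theorem distribuir_hilos_spec : Claim_equal_distribuir_hilos := by
  intro length _
  unfold Spec_distribuir_hilos distribuir_hilos distribuir_hilos_alt
  have hrange : PySem.List.pyRange 0 4 1 = [0, 1, 2, 3] := by decide
  have hmod : 0 ≤ PySem.Int.mod length 4 ∧ PySem.Int.mod length 4 < 4 := by
    constructor
    · exact PySem.Int.mod_nonneg length (by norm_num)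
    · exact PySem.Int.mod_lt length (by norm_num)
  rw [hrange]
  set q := PySem.Int.floordiv length 4 with hq
  set r := PySem.Int.mod length 4 with hr
  simp only [List.foldl, List.map]
  split_ifs <;>
    simp only [List.cons.injEq, List.nil_append, List.cons_append, Prod.mk.injEq,
       and_true] <;>
    refine ⟨⟨?_, ?_⟩, ⟨?_, ?_⟩, ⟨?_, ?_⟩, ?_, ?_⟩ <;> omega
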